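-- pv_equiv track=rewrite | github.com/jakezacharia/naivebayes | bayes.py | compute_word_counts
-- ===== SOURCE A (Python) =====
-- from typing import List, Tuple, Dict
-- from collections import defaultdict
--
-- def compute_word_counts(dataset: List[Tuple[str, str]]) -> Tuple[Dict[str, Dict[str, int]], Dict[str, int]]:
--   # init data structures - any new word inits with count of 0 due to defaultdict(int)
--   word_counts = defaultdict(lambda:defaultdict(int))
--   # this dict will track word count for each label
--   label_word_counts = defaultdict(int)
--
--   # iterate through dataset, go through each (label, message) pair in the dataset
--   for label, message in dataset:
--     # process each word (split each message into words)
--     for word in message.split():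
--       # update word counts
--       # increment total count for current word in the apprpriate label dict (*starts at 0 if word is new for label*)
--       word_counts[label][word] += 1
--       # increment total word count for current label
--       label_word_counts[label] += 1
--
--   return dict(word_counts), dict(label_word_counts)
-- ===== SOURCE B (Python) =====
-- from collections import Counter, defaultdict
--
-- def compute_word_counts(dataset):
--   # Flatten to one token stream of (label, word) pairs, count with a single
--   # pair-keyed Counter, then reassemble the nested per-label table from it.
--   pairs = [(label, word) for label, message in dataset for word in message.split()]
--   pair_counts = Counter(pairs)
--   label_word_counts = dict(Counter(label for label, word in pairs))
--   word_counts = {}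
--   for (label, word), c in pair_counts.items():
--     word_counts.setdefault(label, defaultdict(int))[word] = c
--   return word_counts, label_word_counts
-- ===== Notes on version B (the rewrite author's own statement) =====
-- stated objective: alternative
-- what changed: B replaces A's nested-dict increment loop by a flat tokenization pass into (label, word) pairs, a single pair-keyed Counter (plus a Counter over labels for the totals), and a final reassembly of the nested table from the Counter's items, instead of maintaining the nested defaultdicts while scanning.
import Mathlib
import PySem

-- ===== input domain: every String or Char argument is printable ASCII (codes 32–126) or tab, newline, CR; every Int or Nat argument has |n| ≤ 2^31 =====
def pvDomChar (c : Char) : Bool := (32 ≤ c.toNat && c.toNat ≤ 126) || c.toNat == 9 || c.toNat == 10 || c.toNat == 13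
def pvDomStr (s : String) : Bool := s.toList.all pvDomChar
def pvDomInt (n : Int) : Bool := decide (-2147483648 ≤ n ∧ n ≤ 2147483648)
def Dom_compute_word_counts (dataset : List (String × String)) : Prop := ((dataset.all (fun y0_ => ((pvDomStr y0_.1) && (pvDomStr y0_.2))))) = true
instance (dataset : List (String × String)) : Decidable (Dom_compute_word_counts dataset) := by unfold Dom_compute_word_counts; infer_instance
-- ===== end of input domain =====

-- B flattens the dataset to a stream of (label, word) pairs, counts it with one
-- pair-keyed Counter (plus a Counter over labels), and reassembles the nested
-- table from the Counter's items (objective: alternative algorithm; same cost).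

-- ===== PORT A =====
def compute_word_counts (dataset : List (String × String)) :
    (List (String × List (String × Int))) × (List (String × Int)) :=
  let st :=
    dataset.foldl (fun st p =>
      (PySem.Str.split₀ p.2).foldl (fun st word =>
        (st.1.insert p.1 ((st.1.getD p.1 PySem.Dict.empty).modify word 0 (· + 1)),
         st.2.modify p.1 0 (· + 1))) st)
      (PySem.Dict.empty, PySem.Dict.empty)
  (st.1.items.map (fun q => (q.1, q.2.items)), st.2.items)

-- ===== PORT B =====
def compute_word_counts_alt (dataset : List (String × String)) :
    (List (String × List (String × Int))) × (List (String × Int)) :=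
  let pairs := dataset.flatMap (fun p => (PySem.Str.split₀ p.2).map (fun w => (p.1, w)))
  let pair_counts := PySem.Dict.counter pairs
  let label_word_counts := PySem.Dict.counter (pairs.map (fun p => p.1))
  let word_counts :=
    pair_counts.items.foldl
      (fun d e => d.insert e.1.1 ((d.getD e.1.1 PySem.Dict.empty).insert e.1.2 e.2))
      PySem.Dict.empty
  (word_counts.items.map (fun q => (q.1, q.2.items)), label_word_counts.items)

-- ===== PRECONDITION & SPEC =====
def Spec_compute_word_counts (dataset : List (String × String)) (out : (List (String × List (String × Int))) × (List (String × Int))) : Prop := out = compute_word_counts_alt dataset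
instance (dataset : List (String × String)) (out : (List (String × List (String × Int))) × (List (String × Int))) : Decidable (Spec_compute_word_counts dataset out) := by unfold Spec_compute_word_counts; infer_instance

-- ===== CLAIM (what is proved, stated in full; the proofs are below) =====
def Claim_equal_compute_word_counts : Prop := ∀ (dataset : List (String × String)), Dom_compute_word_counts dataset → Spec_compute_word_counts dataset (compute_word_counts dataset)

-- ===== LEMMAS AND PROOFS =====

-- A's one-word step on the nested dict
def cwcStepB (label : String) (d : PySem.Dict String (PySem.Dict String Int)) (word : String) :
    PySem.Dict String (PySem.Dict String Int) :=
  d.insert label ((d.getD label PySem.Dict.empty).modify word 0 (· + 1))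

-- B's reassembly step: one Counter item into the nested dict
def cwcStepR (d : PySem.Dict String (PySem.Dict String Int)) (e : (String × String) × Int) :
    PySem.Dict String (PySem.Dict String Int) :=
  d.insert e.1.1 ((d.getD e.1.1 PySem.Dict.empty).insert e.1.2 e.2)

def cwcReasm (acc : PySem.Dict String (PySem.Dict String Int))
    (es : List ((String × String) × Int)) : PySem.Dict String (PySem.Dict String Int) :=
  es.foldl cwcStepR acc

theorem cwcReasm_cons (acc : PySem.Dict String (PySem.Dict String Int))
    (e : (String × String) × Int) (es : List ((String × String) × Int)) :
    cwcReasm acc (e :: es) = cwcReasm (cwcStepR acc e) es := rfl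

-- a fold over the flattened (label, word) stream is A's nested loop
theorem cwc_foldl_pairs {σ : Type} (f : σ → (String × String) → σ)
    (ds : List (String × String)) (init : σ) :
    (ds.flatMap (fun p => (PySem.Str.split₀ p.2).map (fun w => (p.1, w)))).foldl f init
      = ds.foldl (fun st p => (PySem.Str.split₀ p.2).foldl (fun st w => f st (p.1, w)) st) init := by
  induction ds generalizing init with
  | nil => rfl
  | cons p ps ih =>
    simp only [List.flatMap_cons, List.foldl_append, List.foldl_map, List.foldl_cons]
    exact ih _

-- inserts at two different keys commute when the first key is already present
theorem cwc_insert_comm {ν : Type} (d : PySem.Dict String ν) (k k' : String) (v v' : ν)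
    (hk : d.contains k = true) (hne : k' ≠ k) :
    (d.insert k v).insert k' v' = (d.insert k' v').insert k v := by
  apply PySem.Dict.ext
  by_cases hk' : d.contains k' = true
  · have hA : (d.insert k v).contains k' = true := by
      rw [PySem.Dict.contains_insert]; simp [hk']
    have hB : (d.insert k' v').contains k = true := by
      rw [PySem.Dict.contains_insert]; simp [hk]
    rw [PySem.Dict.items_insert_of_contains _ _ hA, PySem.Dict.items_insert_of_contains _ _ hk,
        PySem.Dict.items_insert_of_contains _ _ hB, PySem.Dict.items_insert_of_contains _ _ hk',
        List.map_map, List.map_map]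
    apply List.map_congr_left
    intro p _
    by_cases h1 : p.1 = k <;> by_cases h2 : p.1 = k' <;> simp_all
  · have hk'' : d.contains k' = false := by simpa using hk'
    have hA : (d.insert k v).contains k' = false := by
      rw [PySem.Dict.contains_insert]; simp [hk'', hne]
    have hB : (d.insert k' v').contains k = true := by
      rw [PySem.Dict.contains_insert]; simp [hk]
    rw [PySem.Dict.items_insert_of_not_contains _ _ hA, PySem.Dict.items_insert_of_contains _ _ hk,
        PySem.Dict.items_insert_of_contains _ _ hB, PySem.Dict.items_insert_of_not_contains _ _ hk'',
        List.map_append]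
    simp [hne]

-- one-step commutation: stepB at q commutes with stepR on an entry with a different pair key
theorem cwc_step_comm (q : String × String) (e : (String × String) × Int)
    (acc : PySem.Dict String (PySem.Dict String Int))
    (h1 : acc.contains q.1 = true) (h2 : (acc.getD q.1 PySem.Dict.empty).contains q.2 = true)
    (hne : e.1 ≠ q) :
    cwcStepR (cwcStepB q.1 acc q.2) e = cwcStepB q.1 (cwcStepR acc e) q.2 := by
  unfold cwcStepR cwcStepB
  by_cases hL : e.1.1 = q.1
  · have hw : e.1.2 ≠ q.2 := fun hw => hne (Prod.ext hL hw)
    rw [hL, PySem.Dict.getD_insert_self, PySem.Dict.insert_insert_self,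
        PySem.Dict.getD_insert_self, PySem.Dict.insert_insert_self]
    congr 1
    have hmod : ∀ (I : PySem.Dict String Int), I.modify q.2 0 (· + 1) = I.insert q.2 (I.getD q.2 0 + 1) :=
      fun _ => rfl
    rw [hmod, hmod, PySem.Dict.getD_insert, if_neg (Ne.symm hw)]
    exact cwc_insert_comm _ q.2 e.1.2 _ _ h2 hw
  · rw [PySem.Dict.getD_insert, if_neg hL, PySem.Dict.getD_insert,
        if_neg (fun h => hL h.symm)]
    exact cwc_insert_comm acc q.1 e.1.1 _ _ h1 hL

theorem cwc_reasm_stepB_comm (q : String × String) (es : List ((String × String) × Int))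
    (hne : ∀ e ∈ es, e.1 ≠ q) :
    ∀ acc, acc.contains q.1 = true → (acc.getD q.1 PySem.Dict.empty).contains q.2 = true →
    cwcReasm (cwcStepB q.1 acc q.2) es = cwcStepB q.1 (cwcReasm acc es) q.2 := by
  induction es with
  | nil => intro acc _ _; rfl
  | cons e es ih =>
    intro acc h1 h2
    have hne' : ∀ e' ∈ es, e'.1 ≠ q := fun e' h => hne e' (List.mem_cons_of_mem _ h)
    have h1' : (cwcStepR acc e).contains q.1 = true := by
      unfold cwcStepR; rw [PySem.Dict.contains_insert]; simp [h1]
    have h2' : ((cwcStepR acc e).getD q.1 PySem.Dict.empty).contains q.2 = true := by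
      unfold cwcStepR
      rw [PySem.Dict.getD_insert]
      by_cases hL : q.1 = e.1.1
      · rw [if_pos hL, ← hL, PySem.Dict.contains_insert]; simp [h2]
      · rw [if_neg hL]; exact h2
    rw [cwcReasm_cons, cwcReasm_cons, cwc_step_comm q e acc h1 h2 (hne e List.mem_cons_self)]
    exact ih hne' (cwcStepR acc e) h1' h2'

theorem cwc_reasm_bump (q : String × String) (c : Int) (es : List ((String × String) × Int))
    (hnd : (es.map (fun e => e.1)).Nodup) (hmem : (q, c) ∈ es) :
    ∀ acc, cwcReasm acc (es.map (fun p => if p.1 == q then (q, c + 1) else p))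
      = cwcStepB q.1 (cwcReasm acc es) q.2 := by
  induction es with
  | nil => cases hmem
  | cons e es ih =>
    intro acc
    have hnd2 : (e.1 :: es.map (fun e => e.1)).Nodup := by simpa using hnd
    rcases List.nodup_cons.mp hnd2 with ⟨hx, hnd'⟩
    by_cases he : e.1 = q
    · have hq_notin : ∀ e' ∈ es, e'.1 ≠ q := by
        intro e' h' hq'
        exact hx (he ▸ hq' ▸ List.mem_map_of_mem h')
      have hec : e = (q, c) := by
        rcases List.mem_cons.mp hmem with h | h
        · exact h.symm
        · exact absurd (List.mem_map_of_mem (f := fun e => e.1) h) (by simpa [he] using hx)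
      have hid : es.map (fun p => if p.1 == q then (q, c + 1) else p) = es := by
        apply List.map_congr_left ?_ |>.trans (List.map_id es)
        intro p hp
        simp [hq_notin p hp]
      subst hec
      have hca : (cwcStepR acc (q, c)).contains q.1 = true := by
        simp [cwcStepR]
      have hcb : ((cwcStepR acc (q, c)).getD q.1 PySem.Dict.empty).contains q.2 = true := by
        simp [cwcStepR, PySem.Dict.getD_insert_self]
      have hhead : cwcStepB q.1 (cwcStepR acc (q, c)) q.2 = cwcStepR acc (q, c + 1) := by
        unfold cwcStepR cwcStepB
        have hmod : ∀ (I : PySem.Dict String Int), I.modify q.2 0 (· + 1) = I.insert q.2 (I.getD q.2 0 + 1) :=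
          fun _ => rfl
        rw [PySem.Dict.getD_insert_self, PySem.Dict.insert_insert_self, hmod,
            PySem.Dict.getD_insert_self, PySem.Dict.insert_insert_self]
      rw [List.map_cons, if_pos (by simp : (((q, c) : (String × String) × Int).1 == q) = true),
          cwcReasm_cons, hid, cwcReasm_cons,
          ← cwc_reasm_stepB_comm q es hq_notin (cwcStepR acc (q, c)) hca hcb, hhead]
    · have hmem' : (q, c) ∈ es := by
        rcases List.mem_cons.mp hmem with h | h
        · exact absurd (congrArg Prod.fst h.symm) he
        · exact h
      rw [List.map_cons, if_neg (by simpa using he), cwcReasm_cons, cwcReasm_cons]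
      exact ih hnd' hmem' (cwcStepR acc e)

theorem cwc_reasm_getD_zero (q : String × String) (es : List ((String × String) × Int))
    (h : ∀ e ∈ es, e.1 ≠ q) :
    ∀ acc, ((acc.getD q.1 PySem.Dict.empty).getD q.2 0 = 0) →
    (((cwcReasm acc es).getD q.1 PySem.Dict.empty).getD q.2 0 = 0) := by
  induction es with
  | nil => exact fun acc h0 => h0
  | cons e es ih =>
    intro acc h0
    have hne := h e List.mem_cons_self
    have h' : ∀ e' ∈ es, e'.1 ≠ q := fun e' he' => h e' (List.mem_cons_of_mem _ he')
    refine ih h' (cwcStepR acc e) ?_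
    unfold cwcStepR
    rw [PySem.Dict.getD_insert]
    by_cases hL : q.1 = e.1.1
    · have hw : q.2 ≠ e.1.2 := by
        intro hw; exact hne (Prod.ext hL.symm hw.symm)
      rw [if_pos hL, PySem.Dict.getD_insert, if_neg hw, ← hL]; exact h0
    · rw [if_neg hL]; exact h0

-- MAIN: reassembling the pair Counter rebuilds A's nested fold
theorem cwc_main (ps : List (String × String)) :
    cwcReasm PySem.Dict.empty (PySem.Dict.counter ps).items
      = ps.foldl (fun d q => cwcStepB q.1 d q.2) PySem.Dict.empty := by
  induction ps using List.reverseRecOn with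
  | nil => rfl
  | append_singleton ps q ih =>
    have hcnt : PySem.Dict.counter (ps ++ [q]) = (PySem.Dict.counter ps).modify q 0 (· + 1) := by
      rw [PySem.Dict.counter_eq_foldl, PySem.Dict.counter_eq_foldl, List.foldl_append]; rfl
    have hnd : (PySem.Dict.counter ps).keys.Nodup := PySem.Dict.nodup_keys_counter ps
    have hmod : (PySem.Dict.counter ps).modify q 0 (· + 1)
        = (PySem.Dict.counter ps).insert q ((PySem.Dict.counter ps).getD q 0 + 1) := rfl
    rw [List.foldl_append, List.foldl_cons, List.foldl_nil, ← ih, hcnt, hmod]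
    by_cases hc : (PySem.Dict.counter ps).contains q = true
    · obtain ⟨c, hget⟩ : ∃ c, (PySem.Dict.counter ps).get? q = some c := by
        cases hg : (PySem.Dict.counter ps).get? q with
        | none => rw [PySem.Dict.contains_eq_isSome_get?, hg] at hc; simp at hc
        | some c => exact ⟨c, rfl⟩
      have hgd : (PySem.Dict.counter ps).getD q 0 = c := by
        rw [PySem.Dict.getD_eq_get?_getD, hget]; rfl
      have hmem : (q, c) ∈ (PySem.Dict.counter ps).items :=
        PySem.Dict.mem_items_of_get?_eq_some _ hget
      rw [PySem.Dict.items_insert_of_contains _ _ hc, hgd]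
      exact cwc_reasm_bump q c (PySem.Dict.counter ps).items hnd hmem PySem.Dict.empty
    · have hc' : (PySem.Dict.counter ps).contains q = false := by simpa using hc
      have hnotin : ∀ e ∈ (PySem.Dict.counter ps).items, e.1 ≠ q := by
        intro e he heq
        have hqk : q ∈ (PySem.Dict.counter ps).keys := heq ▸ List.mem_map_of_mem he
        rw [← PySem.Dict.contains_iff_mem_keys, hc'] at hqk
        cases hqk
      have h0 := cwc_reasm_getD_zero q (PySem.Dict.counter ps).items hnotin PySem.Dict.empty
        (by simp [pysem])
      rw [PySem.Dict.items_insert_of_not_contains _ _ hc',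
          PySem.Dict.getD_of_not_contains _ _ hc']
      have happ : cwcReasm PySem.Dict.empty ((PySem.Dict.counter ps).items ++ [(q, 0 + 1)])
          = cwcStepR (cwcReasm PySem.Dict.empty (PySem.Dict.counter ps).items) (q, 0 + 1) := by
        simp [cwcReasm, List.foldl_append]
      rw [happ]
      show (cwcReasm PySem.Dict.empty (PySem.Dict.counter ps).items).insert q.1
          (((cwcReasm PySem.Dict.empty (PySem.Dict.counter ps).items).getD q.1 PySem.Dict.empty).insert q.2 (0 + 1))
        = cwcStepB q.1 (cwcReasm PySem.Dict.empty (PySem.Dict.counter ps).items) q.2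
      unfold cwcStepB
      have hmod2 : ∀ (I : PySem.Dict String Int), I.modify q.2 0 (· + 1) = I.insert q.2 (I.getD q.2 0 + 1) :=
        fun _ => rfl
      rw [hmod2, h0]

-- ===== VERDICT (by name: the statement is the Claim_ definition above) =====
theorem compute_word_counts_spec : Claim_equal_compute_word_counts := by
  intro dataset _
  unfold Spec_compute_word_counts compute_word_counts compute_word_counts_alt
  have hsplit :
      dataset.foldl (fun st p =>
        (PySem.Str.split₀ p.2).foldl (fun st word =>
          (st.1.insert p.1 ((st.1.getD p.1 PySem.Dict.empty).modify word 0 (· + 1)),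
           st.2.modify p.1 0 (· + 1))) st)
        ((PySem.Dict.empty : PySem.Dict String (PySem.Dict String Int)),
         (PySem.Dict.empty : PySem.Dict String Int))
      = ((dataset.flatMap (fun p => (PySem.Str.split₀ p.2).map (fun w => (p.1, w)))).foldl
          (fun st e => (cwcStepB e.1 st.1 e.2, st.2.modify e.1 0 (· + 1)))
          (PySem.Dict.empty, PySem.Dict.empty)) :=
    (cwc_foldl_pairs (σ := PySem.Dict String (PySem.Dict String Int) × PySem.Dict String Int)
      (fun st e => (cwcStepB e.1 st.1 e.2, st.2.modify e.1 0 (· + 1)))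
      dataset (PySem.Dict.empty, PySem.Dict.empty)).symm
  have hE := hsplit.trans (by
    rw [PySem.List.foldl_prod_mk (f := fun d (e : String × String) => cwcStepB e.1 d e.2)
        (g := fun (d : PySem.Dict String Int) (e : String × String) => d.modify e.1 0 (· + 1))])
  dsimp only
  rw [hE, ← cwc_main, PySem.Dict.counter_eq_foldl
        (xs := (dataset.flatMap (fun p => (PySem.Str.split₀ p.2).map (fun w => (p.1, w)))).map
          (fun p => p.1)),
      List.foldl_map]
  rfl
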